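-- pv_equiv track=rewrite | github.com/tdtscvt/JPEG | entrophy.py | get_two_least_frequency
-- ===== SOURCE A (Python) =====
-- def get_two_least_frequency(value, freq):
--     if len(value) == 1:
--         return 0, 0
--
--     first = -1
--     second = -1
--     for i in range(len(value)):
--         if freq[i] == 0:
--             continue
--
--         if first == -1:
--             first = i
--             continue
--
--         if freq[i] < freq[first]:
--             second = first
--             first = i
--         elif second == -1:
--             second = i
--         elif freq[i] < freq[second]:
--             second = i
--
--     return first, second
-- ===== SOURCE B (Python) =====
-- def get_two_least_frequency(value, freq):
--     if len(value) == 1: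
--         return 0, 0
--     cand = sorted((i for i in range(len(value)) if freq[i] != 0), key=lambda i: freq[i])
--     first = cand[0] if cand else -1
--     second = cand[1] if len(cand) >= 2 else -1
--     return first, second
-- ===== Notes on version B (the rewrite author's own statement) =====
-- stated objective: idiomatic
-- what changed: Replaces the single-pass min/second-min tracker with a stable sort of the nonzero indices by frequency followed by selecting the first two.
import Mathlib
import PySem

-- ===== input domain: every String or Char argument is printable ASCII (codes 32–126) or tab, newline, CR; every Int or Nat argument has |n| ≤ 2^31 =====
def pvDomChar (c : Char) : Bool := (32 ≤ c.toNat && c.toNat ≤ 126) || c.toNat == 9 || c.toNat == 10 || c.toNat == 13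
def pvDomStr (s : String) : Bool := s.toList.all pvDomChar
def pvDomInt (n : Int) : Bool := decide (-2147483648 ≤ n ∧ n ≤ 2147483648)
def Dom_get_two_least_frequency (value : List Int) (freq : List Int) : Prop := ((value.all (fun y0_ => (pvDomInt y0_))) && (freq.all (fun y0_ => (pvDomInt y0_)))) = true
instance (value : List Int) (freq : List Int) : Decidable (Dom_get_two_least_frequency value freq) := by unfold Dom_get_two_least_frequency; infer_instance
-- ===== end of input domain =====

-- B replaces A's single-pass first/second-minimum tracker with a stable sort of the
-- nonzero indices by frequency and selection of the first two (same result, incl. ties).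

-- ===== PORT A =====
-- the body of A's for-loop over i in range(len(value)), state = (first, second)
def pvStepA (freq : List Int) (st : Int × Int) (i : Int) : Int × Int :=
  if PySem.List.pyGetD freq i 0 = 0 then st
  else if st.1 = -1 then (i, st.2)
  else if PySem.List.pyGetD freq i 0 < PySem.List.pyGetD freq st.1 0 then (i, st.1)
  else if st.2 = -1 then (st.1, i)
  else if PySem.List.pyGetD freq i 0 < PySem.List.pyGetD freq st.2 0 then (st.1, i)
  else st

def get_two_least_frequency (value : List Int) (freq : List Int) : Int × Int :=
  if value.length = 1 then (0, 0)
  else (PySem.List.pyRange 0 (value.length : Int) 1).foldl (pvStepA freq) (-1, -1)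

-- ===== PORT B =====
def get_two_least_frequency_alt (value : List Int) (freq : List Int) : Int × Int :=
  if value.length = 1 then (0, 0)
  else
    let cand := PySem.List.sorted
      ((PySem.List.pyRange 0 (value.length : Int) 1).filter
        (fun i => PySem.List.pyGetD freq i 0 != 0))
      (fun i => PySem.List.pyGetD freq i 0) false
    (match cand with | [] => -1 | a :: _ => a,
     match cand with | _ :: b :: _ => b | _ => -1)

-- ===== PRECONDITION & SPEC =====
-- Pre_ excludes exactly the inputs where Python A raises IndexError: freq[i] is read for
-- every i < len(value) (unless len(value) == 1, which returns before touching freq).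
def Pre_get_two_least_frequency (value : List Int) (freq : List Int) : Prop :=
  value.length = 1 ∨ value.length ≤ freq.length
instance (value : List Int) (freq : List Int) : Decidable (Pre_get_two_least_frequency value freq) := by unfold Pre_get_two_least_frequency; infer_instance

def pvWitness_get_two_least_frequency : List Int × List Int := ([3, 5, 7], [2, 0, 1])

def Spec_get_two_least_frequency (value : List Int) (freq : List Int) (out : Int × Int) : Prop := out = get_two_least_frequency_alt value freq
instance (value : List Int) (freq : List Int) (out : Int × Int) : Decidable (Spec_get_two_least_frequency value freq out) := by unfold Spec_get_two_least_frequency; infer_instance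

-- ===== CLAIM (what is proved, stated in full; the proofs are below) =====
def Claim_equal_get_two_least_frequency : Prop := ∀ (value : List Int) (freq : List Int), Dom_get_two_least_frequency value freq → Pre_get_two_least_frequency value freq → Spec_get_two_least_frequency value freq (get_two_least_frequency value freq)

-- ===== LEMMAS AND PROOFS =====

-- (first, second) as A keeps them = the first two entries of B's candidate list, -1-padded
def pvEncode (s : List Int) : Int × Int :=
  match s with
  | [] => (-1, -1)
  | [a] => (a, -1)
  | a :: b :: _ => (a, b)

theorem pvStep_insertBy (freq : List Int) (s : List Int) (i : Int)
    (hs : ∀ x ∈ s, 0 ≤ x) (hi : PySem.List.pyGetD freq i 0 ≠ 0) :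
    pvStepA freq (pvEncode s) i =
      pvEncode (PySem.List.insertBy
        (fun a b => decide (PySem.List.pyGetD freq a 0 < PySem.List.pyGetD freq b 0)) i s) := by
  match s with
  | [] => simp [pvStepA, pvEncode, PySem.List.insertBy, hi]
  | [a] =>
    have ha : ¬ (a = -1) := by have := hs a (by simp); omega
    by_cases h1 : PySem.List.pyGetD freq i 0 < PySem.List.pyGetD freq a 0 <;>
      simp [pvStepA, pvEncode, PySem.List.insertBy, hi, ha, h1]
  | a :: b :: t =>
    have ha : ¬ (a = -1) := by have := hs a (by simp); omega
    have hb : ¬ (b = -1) := by have := hs b (by simp); omega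
    by_cases h1 : PySem.List.pyGetD freq i 0 < PySem.List.pyGetD freq a 0
    · simp [pvStepA, pvEncode, PySem.List.insertBy, hi, ha, h1]
    · by_cases h2 : PySem.List.pyGetD freq i 0 < PySem.List.pyGetD freq b 0 <;>
        simp [pvStepA, pvEncode, PySem.List.insertBy, hi, ha, hb, h1, h2]

theorem pvLoop (freq : List Int) (l : List Int) (acc : List Int)
    (hacc : ∀ x ∈ acc, 0 ≤ x) (hl : ∀ x ∈ l, 0 ≤ x) :
    l.foldl (pvStepA freq) (pvEncode acc) =
      pvEncode ((l.filter (fun i => PySem.List.pyGetD freq i 0 != 0)).foldl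
        (fun a i => PySem.List.insertBy
          (fun a b => decide (PySem.List.pyGetD freq a 0 < PySem.List.pyGetD freq b 0)) i a) acc) := by
  induction l generalizing acc with
  | nil => simp
  | cons i t ih =>
    by_cases h : PySem.List.pyGetD freq i 0 = 0
    · have hskip : pvStepA freq (pvEncode acc) i = pvEncode acc := by simp [pvStepA, h]
      simpa [h, hskip] using ih acc hacc (fun x hx => hl x (by simp [hx]))
    · have hstep := pvStep_insertBy freq acc i hacc h
      have hacc' : ∀ x ∈ PySem.List.insertBy
          (fun a b => decide (PySem.List.pyGetD freq a 0 < PySem.List.pyGetD freq b 0)) i acc, 0 ≤ x := by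
        intro y hy
        rcases (PySem.List.mem_insertBy _ _ _ _).1 hy with rfl | hy'
        · exact hl y (by simp)
        · exact hacc y hy'
      simpa [h, hstep] using ih _ hacc' (fun x hx => hl x (by simp [hx]))

-- ===== VERDICT (by name: the statement is the Claim_ definition above) =====
theorem get_two_least_frequency_spec : Claim_equal_get_two_least_frequency := by
  intro value freq _ _
  unfold Spec_get_two_least_frequency get_two_least_frequency get_two_least_frequency_alt
  by_cases hlen : value.length = 1
  · simp [hlen]
  · simp only [hlen, if_false]
    have hl : ∀ x ∈ PySem.List.pyRange 0 (value.length : Int) 1, 0 ≤ x := by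
      intro x hx
      have := (PySem.List.mem_pyRange_one).1 hx
      omega
    have := pvLoop freq (PySem.List.pyRange 0 (value.length : Int) 1) [] (by simp) hl
    rw [PySem.List.sorted_eq_foldl_insertBy]
    rw [show ((-1 : Int), (-1 : Int)) = pvEncode [] from rfl, this]
    cases ((PySem.List.pyRange 0 (value.length : Int) 1).filter
        (fun i => PySem.List.pyGetD freq i 0 != 0)).foldl
        (fun a i => PySem.List.insertBy
          (fun a b => decide (PySem.List.pyGetD freq a 0 < PySem.List.pyGetD freq b 0)) i a) [] with
    | nil => rfl
    | cons a t => cases t <;> rfl
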